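-- pv_equiv track=rewrite | github.com/HanzoRazer/luthiers-toolbox | services/api/app/rmos/runs_v2/diff.py | _severity_from_diff
-- ===== SOURCE A (Python) =====
-- from typing import Any, Dict, List, Optional
--
-- def _severity_from_diff(diff: Dict[str, Any]) -> str:
--     """
--     Determine severity from diff.
--
--     CRITICAL: gcode/toolpaths hash changed, risk_level changed, status changed
--     WARNING: feasibility_sha256 changed, score changed
--     INFO: notes/errors-only changes
--     """
--     critical_keys = {
--         "hashes.gcode_sha256",
--         "hashes.toolpaths_sha256",
--         "decision.risk_level",
--         "status",
--     }
--     warning_keys = {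
--         "hashes.feasibility_sha256",
--         "decision.score",
--     }
--
--     changed_paths = set(diff.get("changed_paths", []))
--
--     if any(p in changed_paths for p in critical_keys):
--         return "CRITICAL"
--     if any(p in changed_paths for p in warning_keys):
--         return "WARNING"
--     if changed_paths:
--         return "INFO"
--     return "INFO"
-- ===== SOURCE B (Python) =====
-- _RANK = {
--     "hashes.gcode_sha256": 2,
--     "hashes.toolpaths_sha256": 2,
--     "decision.risk_level": 2,
--     "status": 2,
--     "hashes.feasibility_sha256": 1,
--     "decision.score": 1,
-- }
--
-- def _severity_from_diff(diff):
--     m = 0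
--     for p in diff.get("changed_paths", []):
--         m = max(m, _RANK.get(p, 0))
--     return "CRITICAL" if m == 2 else "WARNING" if m == 1 else "INFO"
-- ===== Notes on version B (the rewrite author's own statement) =====
-- stated objective: alternative
-- what changed: Inverts the traversal: instead of building a set of changed paths and testing each fixed key set for membership, B maps each known path to a severity rank once and takes the running maximum rank in a single pass over the changed paths.
import Mathlib
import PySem

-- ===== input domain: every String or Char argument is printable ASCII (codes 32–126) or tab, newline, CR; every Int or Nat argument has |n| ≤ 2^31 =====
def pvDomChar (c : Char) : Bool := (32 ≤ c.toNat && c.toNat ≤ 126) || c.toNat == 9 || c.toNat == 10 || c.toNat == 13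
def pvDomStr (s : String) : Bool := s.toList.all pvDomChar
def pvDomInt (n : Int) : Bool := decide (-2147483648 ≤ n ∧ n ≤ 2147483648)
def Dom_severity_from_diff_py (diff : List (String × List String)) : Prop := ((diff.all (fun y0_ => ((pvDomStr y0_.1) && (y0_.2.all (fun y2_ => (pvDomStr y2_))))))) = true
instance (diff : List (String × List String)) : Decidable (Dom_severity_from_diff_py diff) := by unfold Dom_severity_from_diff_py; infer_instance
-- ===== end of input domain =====

-- B re-implements A by a single max-rank pass over the changed paths instead of set-membership tests per key set (alternative decomposition, same cost).


-- ===== PORT A =====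
def pvCriticalKeys : PySem.Set String :=
  PySem.Set.ofList ["hashes.gcode_sha256", "hashes.toolpaths_sha256", "decision.risk_level", "status"]

def pvWarningKeys : PySem.Set String :=
  PySem.Set.ofList ["hashes.feasibility_sha256", "decision.score"]

def severity_from_diff_py (diff : List (String × List String)) : String :=
  let changed_paths : PySem.Set String :=
    PySem.Set.ofList (((diff.find? (fun kv => kv.1 == "changed_paths")).map (fun kv => kv.2)).getD [])
  if pvCriticalKeys.any (fun p => PySem.Set.contains changed_paths p) then "CRITICAL"
  else if pvWarningKeys.any (fun p => PySem.Set.contains changed_paths p) then "WARNING"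
  else if changed_paths ≠ [] then "INFO"
  else "INFO"

-- ===== PORT B =====
def pvRank : List (String × Int) :=
  [("hashes.gcode_sha256", 2), ("hashes.toolpaths_sha256", 2), ("decision.risk_level", 2),
   ("status", 2), ("hashes.feasibility_sha256", 1), ("decision.score", 1)]

def severity_from_diff_py_alt (diff : List (String × List String)) : String :=
  let m : Int :=
    (((diff.find? (fun kv => kv.1 == "changed_paths")).map (fun kv => kv.2)).getD []).foldl
      (fun m p => max m (((pvRank.find? (fun kv => kv.1 == p)).map (fun kv => kv.2)).getD 0)) 0
  if m = 2 then "CRITICAL" else if m = 1 then "WARNING" else "INFO"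

-- ===== PRECONDITION & SPEC =====
def Spec_severity_from_diff_py (diff : List (String × List String)) (out : String) : Prop := out = severity_from_diff_py_alt diff
instance (diff : List (String × List String)) (out : String) : Decidable (Spec_severity_from_diff_py diff out) := by unfold Spec_severity_from_diff_py; infer_instance

-- ===== CLAIM (what is proved, stated in full; the proofs are below) =====
def Claim_equal_severity_from_diff_py : Prop := ∀ (diff : List (String × List String)), Dom_severity_from_diff_py diff → Spec_severity_from_diff_py diff (severity_from_diff_py diff)

-- ===== LEMMAS AND PROOFS =====

-- the rank of a single path as B's lookup computes it
def pvRankOf (p : String) : Int := ((pvRank.find? (fun kv => kv.1 == p)).map (fun kv => kv.2)).getD 0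

set_option maxRecDepth 8192 in
lemma pv_rank_cases (p : String) : pvRankOf p = 0 ∨ pvRankOf p = 1 ∨ pvRankOf p = 2 := by
  unfold pvRankOf pvRank
  simp only [List.find?]
  by_cases h1 : ("hashes.gcode_sha256" == p) = true
  · simp [h1]
  · simp only [Bool.not_eq_true] at h1
    simp only [h1]
    by_cases h2 : ("hashes.toolpaths_sha256" == p) = true
    · simp [h2]
    · simp only [Bool.not_eq_true] at h2
      simp only [h2]
      by_cases h3 : ("decision.risk_level" == p) = true
      · simp [h3]
      · simp only [Bool.not_eq_true] at h3
        simp only [h3]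
        by_cases h4 : ("status" == p) = true
        · simp [h4]
        · simp only [Bool.not_eq_true] at h4
          simp only [h4]
          by_cases h5 : ("hashes.feasibility_sha256" == p) = true
          · simp [h5]
          · simp only [Bool.not_eq_true] at h5
            simp only [h5]
            by_cases h6 : ("decision.score" == p) = true
            · simp [h6]
            · simp only [Bool.not_eq_true] at h6
              simp only [h6]
              simp

set_option maxRecDepth 8192 in
lemma pv_rank_eq_two_iff (p : String) :
    pvRankOf p = 2 ↔ (p = "hashes.gcode_sha256" ∨ p = "hashes.toolpaths_sha256" ∨
      p = "decision.risk_level" ∨ p = "status") := by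
  unfold pvRankOf pvRank
  simp only [List.find?]
  by_cases h1 : ("hashes.gcode_sha256" == p) = true
  · have hp : p = "hashes.gcode_sha256" := (beq_iff_eq.mp h1).symm
    simp [h1, hp]
  · simp only [Bool.not_eq_true] at h1
    simp only [h1]
    by_cases h2 : ("hashes.toolpaths_sha256" == p) = true
    · have hp : p = "hashes.toolpaths_sha256" := (beq_iff_eq.mp h2).symm
      simp [h2, hp]
    · simp only [Bool.not_eq_true] at h2
      simp only [h2]
      by_cases h3 : ("decision.risk_level" == p) = true
      · have hp : p = "decision.risk_level" := (beq_iff_eq.mp h3).symm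
        simp [h3, hp]
      · simp only [Bool.not_eq_true] at h3
        simp only [h3]
        by_cases h4 : ("status" == p) = true
        · have hp : p = "status" := (beq_iff_eq.mp h4).symm
          simp [h4, hp]
        · simp only [Bool.not_eq_true] at h4
          simp only [h4]
          by_cases h5 : ("hashes.feasibility_sha256" == p) = true
          · have hp : p = "hashes.feasibility_sha256" := (beq_iff_eq.mp h5).symm
            simp [h5, hp]
          · simp only [Bool.not_eq_true] at h5
            simp only [h5]
            by_cases h6 : ("decision.score" == p) = true
            · have hp : p = "decision.score" := (beq_iff_eq.mp h6).symm
              simp [h6, hp]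
            · simp only [Bool.not_eq_true] at h6
              simp only [h6]
              constructor
              · intro h; norm_num at h
              · rintro (h | h | h | h) <;> subst h <;> simp_all

set_option maxRecDepth 8192 in
lemma pv_rank_eq_one_iff (p : String) :
    pvRankOf p = 1 ↔ (p = "hashes.feasibility_sha256" ∨ p = "decision.score") := by
  unfold pvRankOf pvRank
  simp only [List.find?]
  by_cases h1 : ("hashes.gcode_sha256" == p) = true
  · have hp : p = "hashes.gcode_sha256" := (beq_iff_eq.mp h1).symm
    simp [h1, hp]
  · simp only [Bool.not_eq_true] at h1
    simp only [h1]
    by_cases h2 : ("hashes.toolpaths_sha256" == p) = true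
    · have hp : p = "hashes.toolpaths_sha256" := (beq_iff_eq.mp h2).symm
      simp [h2, hp]
    · simp only [Bool.not_eq_true] at h2
      simp only [h2]
      by_cases h3 : ("decision.risk_level" == p) = true
      · have hp : p = "decision.risk_level" := (beq_iff_eq.mp h3).symm
        simp [h3, hp]
      · simp only [Bool.not_eq_true] at h3
        simp only [h3]
        by_cases h4 : ("status" == p) = true
        · have hp : p = "status" := (beq_iff_eq.mp h4).symm
          simp [h4, hp]
        · simp only [Bool.not_eq_true] at h4
          simp only [h4]
          by_cases h5 : ("hashes.feasibility_sha256" == p) = true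
          · have hp : p = "hashes.feasibility_sha256" := (beq_iff_eq.mp h5).symm
            simp [h5, hp]
          · simp only [Bool.not_eq_true] at h5
            simp only [h5]
            by_cases h6 : ("decision.score" == p) = true
            · have hp : p = "decision.score" := (beq_iff_eq.mp h6).symm
              simp [h6, hp]
            · simp only [Bool.not_eq_true] at h6
              simp only [h6]
              constructor
              · intro h; norm_num at h
              · rintro (h | h) <;> subst h <;> simp_all

def pvFold (xs : List String) : Int := xs.foldl (fun m p => max m (pvRankOf p)) 0

lemma pv_fold_init (xs : List String) (a : Int) (ha : 0 ≤ a) :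
    xs.foldl (fun m p => max m (pvRankOf p)) a = max a (pvFold xs) := by
  induction xs generalizing a with
  | nil => simp [pvFold]; omega
  | cons x t ih =>
    have hx := pv_rank_cases x
    have h0 : (0:Int) ≤ max a (pvRankOf x) := by omega
    have h0' : (0:Int) ≤ max 0 (pvRankOf x) := by omega
    simp only [pvFold, List.foldl_cons]
    rw [ih _ h0, ih _ h0']
    omega

lemma pv_fold_eq_ite (xs : List String) :
    pvFold xs = (if ∃ p ∈ xs, pvRankOf p = 2 then 2
                 else if ∃ p ∈ xs, pvRankOf p = 1 then 1 else 0) := by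
  induction xs with
  | nil => simp [pvFold]
  | cons x t ih =>
    have hstep : pvFold (x :: t) = max (max 0 (pvRankOf x)) (pvFold t) := by
      simp only [pvFold, List.foldl_cons]
      exact pv_fold_init t _ (by have := pv_rank_cases x; omega)
    rw [hstep, ih]
    by_cases e2 : ∃ p ∈ t, pvRankOf p = 2 <;>
    by_cases e1 : ∃ p ∈ t, pvRankOf p = 1 <;>
    rcases pv_rank_cases x with h | h | h <;>
    simp only [List.exists_mem_cons_iff, h, e2, e1, if_true, if_false,
      iff_true, iff_false, or_true, or_false, true_or, false_or] <;>
    norm_num <;> omega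

lemma pv_any_contains_ofList (ks xs : List String) :
    (ks.any (fun p => PySem.Set.contains (PySem.Set.ofList xs) p) = true) ↔ ∃ p ∈ ks, p ∈ xs := by
  simp [List.any_eq_true, PySem.Set.mem_ofList]

-- ===== VERDICT (by name: the statement is the Claim_ definition above) =====
theorem severity_from_diff_py_spec : Claim_equal_severity_from_diff_py := by
  intro diff _
  unfold Spec_severity_from_diff_py severity_from_diff_py severity_from_diff_py_alt
  set xs := ((diff.find? (fun kv => kv.1 == "changed_paths")).map (fun kv => kv.2)).getD [] with hxs
  simp only []
  have hfold : xs.foldl (fun m p =>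
      max m (((pvRank.find? (fun kv => kv.1 == p)).map (fun kv => kv.2)).getD 0)) 0 = pvFold xs := rfl
  rw [hfold, pv_fold_eq_ite xs]
  have hc : (pvCriticalKeys.any (fun p => PySem.Set.contains (PySem.Set.ofList xs) p) = true)
      ↔ ∃ p ∈ xs, pvRankOf p = 2 := by
    rw [pv_any_contains_ofList]
    constructor
    · rintro ⟨p, hp, hpx⟩
      refine ⟨p, hpx, ?_⟩
      rw [pv_rank_eq_two_iff]
      simp [pvCriticalKeys, PySem.Set.ofList] at hp
      tauto
    · rintro ⟨p, hpx, hr⟩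
      rw [pv_rank_eq_two_iff] at hr
      refine ⟨p, ?_, hpx⟩
      simp [pvCriticalKeys, PySem.Set.ofList]
      tauto
  have hw : (pvWarningKeys.any (fun p => PySem.Set.contains (PySem.Set.ofList xs) p) = true)
      ↔ ∃ p ∈ xs, pvRankOf p = 1 := by
    rw [pv_any_contains_ofList]
    constructor
    · rintro ⟨p, hp, hpx⟩
      refine ⟨p, hpx, ?_⟩
      rw [pv_rank_eq_one_iff]
      simp [pvWarningKeys, PySem.Set.ofList] at hp
      tauto
    · rintro ⟨p, hpx, hr⟩
      rw [pv_rank_eq_one_iff] at hr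
      refine ⟨p, ?_, hpx⟩
      simp [pvWarningKeys, PySem.Set.ofList]
      tauto
  by_cases e2 : ∃ p ∈ xs, pvRankOf p = 2
  · rw [if_pos (hc.mpr e2), if_pos (by rw [if_pos e2])]
  · rw [if_neg (fun h => e2 (hc.mp h)),
        if_neg (show ¬ ((if ∃ p ∈ xs, pvRankOf p = 2 then (2:Int)
          else if ∃ p ∈ xs, pvRankOf p = 1 then 1 else 0) = 2) by
            rw [if_neg e2]; split_ifs <;> norm_num)]
    by_cases e1 : ∃ p ∈ xs, pvRankOf p = 1
    · rw [if_pos (hw.mpr e1), if_pos (by rw [if_neg e2, if_pos e1])]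
    · rw [if_neg (fun h => e1 (hw.mp h)),
          if_neg (show ¬ ((if ∃ p ∈ xs, pvRankOf p = 2 then (2:Int)
            else if ∃ p ∈ xs, pvRankOf p = 1 then 1 else 0) = 1) by
              rw [if_neg e2, if_neg e1]; norm_num)]
      split_ifs <;> rfl
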